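-- pv_equiv track=rewrite | github.com/pk-pythondeveloper/Python_prectise | arun_tava.py | get_prime_factorial
-- ===== SOURCE A (Python) =====
-- def get_prime_factorial(num):
--      factorial=[]
--      list_possibel_factorial=[]
--      for i in range(2,num):
--          if num%i==0:
--              factorial.append(i)
--
--      for j in range(len(factorial)):
--          temp=factorial[j]
--          for k in range(j+1,len(factorial)):
--              temp*=factorial[k]
--              if temp==num:
--                  list_possibel_factorial.append(factorial[j:k+1])
--
--
--      return list_possibel_factorial
-- ===== SOURCE B (Python) =====
-- def get_prime_factorial(num):
--     # Divisors of num in (1, num) via trial division up to sqrt(num):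
--     # pairs (d, num//d) collected in one sqrt-length sweep, then merged in order.
--     small = []
--     large = []
--     d = 2
--     while d * d < num:
--         if num % d == 0:
--             small.append(d)
--             large.append(num // d)
--         d += 1
--     if d * d == num:
--         small.append(d)
--     divisors = small + large[::-1]
--     result = []
--     for j in range(len(divisors)):
--         temp = divisors[j]
--         for k in range(j + 1, len(divisors)):
--             temp *= divisors[k]
--             if temp == num:
--                 result.append(divisors[j:k + 1])
--     return result
-- ===== Notes on version B (the rewrite author's own statement) =====
-- stated objective: faster
-- what changed: B enumerates the divisors via trial division only up to sqrt(num), collecting each divisor together with its cofactor and merging them in ascending order, instead of A's scan of every integer in range(2, num); the contiguous-product search over the divisor list is unchanged.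
import Mathlib
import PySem

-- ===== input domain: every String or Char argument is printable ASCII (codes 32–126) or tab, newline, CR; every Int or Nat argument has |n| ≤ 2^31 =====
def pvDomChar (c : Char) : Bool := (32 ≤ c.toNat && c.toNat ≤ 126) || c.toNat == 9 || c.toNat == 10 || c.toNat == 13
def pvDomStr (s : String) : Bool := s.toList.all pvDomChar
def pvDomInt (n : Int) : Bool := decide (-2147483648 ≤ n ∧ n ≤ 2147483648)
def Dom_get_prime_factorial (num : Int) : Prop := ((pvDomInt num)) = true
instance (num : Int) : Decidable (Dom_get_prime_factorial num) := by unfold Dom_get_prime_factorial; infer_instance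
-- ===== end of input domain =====

-- B replaces A's O(num) divisor scan by trial division up to sqrt(num) (objective: faster);
-- the contiguous-product search over the divisor list is the same in both programs.

-- ===== PORT A =====
def get_prime_factorial (num : Int) : List (List Int) :=
  -- factorial=[]; for i in range(2,num): if num%i==0: factorial.append(i)
  let factorial : List Int :=
    (PySem.List.pyRange 2 num 1).foldl
      (fun acc i => if PySem.Int.mod num i = 0 then acc ++ [i] else acc) []
  let n : Int := (factorial.length : Int)
  -- for j in range(len(factorial)): temp=factorial[j]; for k in range(j+1,len(factorial)): ...
  (PySem.List.pyRange 0 n 1).foldl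
    (fun res j =>
      let temp0 : Int := PySem.List.pyGetD factorial j 0
      ((PySem.List.pyRange (j + 1) n 1).foldl
        (fun (st : Int × List (List Int)) k =>
          let temp := st.1 * PySem.List.pyGetD factorial k 0
          (temp,
            if temp = num then st.2 ++ [PySem.List.slice factorial (some j) (some (k + 1))]
            else st.2))
        (temp0, res)).2)
    []

-- ===== PORT B =====
-- while d*d < num: if num%d==0: small.append(d); large.append(num//d); d+=1
def pvTrial (num d : Int) (small large : List Int) : Int × List Int × List Int :=
  if h : d * d < num then
    if PySem.Int.mod num d = 0 then
      pvTrial num (d + 1) (small ++ [d]) (large ++ [PySem.Int.floordiv num d])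
    else
      pvTrial num (d + 1) small large
  else (d, small, large)
termination_by (num - d).toNat
decreasing_by
  all_goals
    have hd : d ≤ d * d := by nlinarith [sq_nonneg (d - 1)]
    omega

def get_prime_factorial_alt (num : Int) : List (List Int) :=
  let t := pvTrial num 2 [] []
  let small0 := t.2.1
  -- if d*d == num: small.append(d)
  let small := if t.1 * t.1 = num then small0 ++ [t.1] else small0
  -- divisors = small + large[::-1]
  let divisors := small ++ t.2.2.reverse
  let n : Int := (divisors.length : Int)
  -- identical contiguous-product search (same code in Source B as in A)
  (PySem.List.pyRange 0 n 1).foldl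
    (fun res j =>
      let temp0 : Int := PySem.List.pyGetD divisors j 0
      ((PySem.List.pyRange (j + 1) n 1).foldl
        (fun (st : Int × List (List Int)) k =>
          let temp := st.1 * PySem.List.pyGetD divisors k 0
          (temp,
            if temp = num then st.2 ++ [PySem.List.slice divisors (some j) (some (k + 1))]
            else st.2))
        (temp0, res)).2)
    []

-- ===== PRECONDITION & SPEC =====
def Spec_get_prime_factorial (num : Int) (out : List (List Int)) : Prop := out = get_prime_factorial_alt num
instance (num : Int) (out : List (List Int)) : Decidable (Spec_get_prime_factorial num out) := by unfold Spec_get_prime_factorial; infer_instance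

-- ===== CLAIM (what is proved, stated in full; the proofs are below) =====
def Claim_equal_get_prime_factorial : Prop := ∀ (num : Int), Dom_get_prime_factorial num → Spec_get_prime_factorial num (get_prime_factorial num)

-- ===== LEMMAS AND PROOFS =====

-- the common contiguous-product scan, as it appears in both ports (proof-side abbreviation)
def pvScan (num : Int) (divisors : List Int) : List (List Int) :=
  let n : Int := (divisors.length : Int)
  (PySem.List.pyRange 0 n 1).foldl
    (fun res j =>
      let temp0 : Int := PySem.List.pyGetD divisors j 0
      ((PySem.List.pyRange (j + 1) n 1).foldl
        (fun (st : Int × List (List Int)) k =>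
          let temp := st.1 * PySem.List.pyGetD divisors k 0
          (temp,
            if temp = num then st.2 ++ [PySem.List.slice divisors (some j) (some (k + 1))]
            else st.2))
        (temp0, res)).2)
    []

-- A's divisor list
def pvTgt (num : Int) : List Int :=
  (PySem.List.pyRange 2 num 1).filter (fun i => PySem.Int.mod num i = 0)

lemma portA_eq_scan (num : Int) : get_prime_factorial num = pvScan num (pvTgt num) := by
  show pvScan num ((PySem.List.pyRange 2 num 1).foldl
      (fun acc i => if PySem.Int.mod num i = 0 then acc ++ [i] else acc) []) = _
  rw [PySem.List.foldl_append_ite_eq_filter, List.nil_append]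
  rfl

lemma pv_cof_eq (num i m : Int) (hi : 0 < i) (hm : num = i * m) :
    PySem.Int.floordiv num i = m := by
  rw [PySem.Int.floordiv_eq_ediv_of_pos hi, hm, Int.mul_ediv_cancel_left m (by omega)]

-- characterization of the trial-division loop
lemma pvTrial_spec (num : Int) : ∀ (d : Int) (small large : List Int),
    ∃ s : Int, d ≤ s ∧ num ≤ s * s ∧ (∀ i, d ≤ i → i < s → i * i < num) ∧
      pvTrial num d small large =
        (s,
         small ++ (PySem.List.pyRange d s 1).filter (fun i => PySem.Int.mod num i = 0),
         large ++ ((PySem.List.pyRange d s 1).filter (fun i => PySem.Int.mod num i = 0)).map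
           (fun i => PySem.Int.floordiv num i)) := by
  intro d small large
  fun_induction pvTrial num d small large with
  | case1 d small large h hmod ih =>
    obtain ⟨s, h1, h2, h3, h4⟩ := ih
    have hds : d < s := by omega
    have hcons : PySem.List.pyRange d s 1 = d :: PySem.List.pyRange (d + 1) s 1 :=
      PySem.List.pyRange_one_cons hds
    refine ⟨s, by omega, h2, ?_, ?_⟩
    · intro i hdi his
      rcases eq_or_lt_of_le hdi with rfl | hlt
      · exact h
      · exact h3 i (by omega) his
    · rw [h4, hcons]
      simp [hmod]
  | case2 d small large h hmod ih =>
    obtain ⟨s, h1, h2, h3, h4⟩ := ih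
    have hds : d < s := by omega
    have hcons : PySem.List.pyRange d s 1 = d :: PySem.List.pyRange (d + 1) s 1 :=
      PySem.List.pyRange_one_cons hds
    refine ⟨s, by omega, h2, ?_, ?_⟩
    · intro i hdi his
      rcases eq_or_lt_of_le hdi with rfl | hlt
      · exact h
      · exact h3 i (by omega) his
    · rw [h4, hcons]
      simp [hmod]
  | case3 d small large h =>
    exact ⟨d, le_refl d, by omega, by omega, by simp [PySem.List.pyRange_one_eq_nil (le_refl d)]⟩

-- two strictly increasing lists with the same members are equal
lemma pv_eq_of_pairwise_lt {l₁ l₂ : List Int} (h₁ : l₁.Pairwise (· < ·))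
    (h₂ : l₂.Pairwise (· < ·)) (hm : ∀ x, x ∈ l₁ ↔ x ∈ l₂) : l₁ = l₂ := by
  exact List.Perm.eq_of_pairwise (fun a b _ _ h h' => by omega) h₁ h₂
    ((List.perm_ext_iff_of_nodup h₁.nodup h₂.nodup).2 hm)

-- the merged trial-division list is A's divisor list
lemma divisors_eq (num : Int) :
    (if (pvTrial num 2 [] []).1 * (pvTrial num 2 [] []).1 = num
       then (pvTrial num 2 [] []).2.1 ++ [(pvTrial num 2 [] []).1]
       else (pvTrial num 2 [] []).2.1) ++ (pvTrial num 2 [] []).2.2.reverse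
      = pvTgt num := by
  obtain ⟨s, h1, h2, h3, h4⟩ := pvTrial_spec num 2 [] []
  rw [h4]
  simp only [List.nil_append]
  -- arithmetic facts
  have hkey : ∀ i, 2 ≤ i → i < s → i ∣ num →
      2 ≤ PySem.Int.floordiv num i ∧ s ≤ PySem.Int.floordiv num i ∧
      PySem.Int.floordiv num i < num ∧ PySem.Int.floordiv num i ∣ num ∧
      num < PySem.Int.floordiv num i * PySem.Int.floordiv num i ∧
      i * PySem.Int.floordiv num i = num := by
    rintro i hi2 his ⟨m, hm⟩
    have hii : i * i < num := h3 i hi2 his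
    have hfd : PySem.Int.floordiv num i = m := pv_cof_eq num i m (by omega) hm
    have him : i < m := by nlinarith
    have hmm : num < m * m := by nlinarith
    have hsm : s ≤ m := by
      rcases le_or_gt s m with hle | hlt
      · exact hle
      · have := h3 m (by omega) hlt
        linarith
    have hmlt : m < num := by nlinarith
    rw [hfd]
    exact ⟨by omega, hsm, hmlt, ⟨i, by rw [hm]; ring⟩, hmm, by omega⟩
  have hback : ∀ x, 2 ≤ x → x < num → x ∣ num → s ≤ x → x * x ≠ num →
      ∃ i, (2 ≤ i ∧ i < s ∧ i ∣ num) ∧ PySem.Int.floordiv num i = x := by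
    rintro x hx2 hxn ⟨m, hm⟩ hsx hne
    have hxx : num < x * x := by
      rcases lt_trichotomy (x * x) num with hlt | heq | hgt
      · nlinarith
      · exact absurd heq hne
      · exact hgt
    have hm2 : 2 ≤ m := by nlinarith
    have hmx : m < x := by nlinarith
    have hmmlt : m * m < num := by nlinarith
    have hms : m < s := by
      rcases lt_or_ge m s with hlt | hle
      · exact hlt
      · nlinarith
    exact ⟨m, ⟨hm2, hms, ⟨x, by rw [hm]; ring⟩⟩, pv_cof_eq num m x (by omega) (by rw [hm]; ring)⟩
  -- membership in the small filter
  have hmemF : ∀ x : Int,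
      x ∈ (PySem.List.pyRange 2 s 1).filter (fun i => PySem.Int.mod num i = 0) ↔
      2 ≤ x ∧ x < s ∧ x ∣ num := by
    intro x
    simp [List.mem_filter, PySem.List.mem_pyRange_one, PySem.Int.mod_eq_zero_iff_dvd, and_assoc]
  have hmemT : ∀ x : Int, x ∈ pvTgt num ↔ 2 ≤ x ∧ x < num ∧ x ∣ num := by
    intro x
    simp [pvTgt, List.mem_filter, PySem.List.mem_pyRange_one, PySem.Int.mod_eq_zero_iff_dvd,
      and_assoc]
  have hpF : ((PySem.List.pyRange 2 s 1).filter
      (fun i => PySem.Int.mod num i = 0) : List Int).Pairwise (· < ·) :=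
    (PySem.List.pairwise_lt_pyRange_one 2 s).filter _
  have hpT : (pvTgt num).Pairwise (· < ·) :=
    (PySem.List.pairwise_lt_pyRange_one 2 num).filter _
  -- pairwise of the reversed cofactor list
  have hpL : (((PySem.List.pyRange 2 s 1).filter (fun i => PySem.Int.mod num i = 0)).map
      (fun i => PySem.Int.floordiv num i)).reverse.Pairwise (· < ·) := by
    rw [List.pairwise_reverse, List.pairwise_map]
    refine hpF.imp_of_mem ?_
    intro a b ha hb hab
    obtain ⟨ha2, has, hadvd⟩ := (hmemF a).1 ha
    obtain ⟨hb2, hbs, hbdvd⟩ := (hmemF b).1 hb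
    obtain ⟨_, _, _, _, _, haeq⟩ := hkey a ha2 has hadvd
    obtain ⟨hb2', _, _, _, _, hbeq⟩ := hkey b hb2 hbs hbdvd
    nlinarith
  have hcrossL : ∀ a ∈ (PySem.List.pyRange 2 s 1).filter (fun i => PySem.Int.mod num i = 0),
      ∀ b ∈ (((PySem.List.pyRange 2 s 1).filter (fun i => PySem.Int.mod num i = 0)).map
        (fun i => PySem.Int.floordiv num i)).reverse, a < b := by
    intro a ha b hb
    rw [List.mem_reverse, List.mem_map] at hb
    obtain ⟨i, hi, rfl⟩ := hb
    obtain ⟨ha2, has, _⟩ := (hmemF a).1 ha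
    obtain ⟨hi2, his, hidvd⟩ := (hmemF i).1 hi
    obtain ⟨_, hsbig, _, _, _, _⟩ := hkey i hi2 his hidvd
    omega
  split_ifs with hc
  · -- s*s = num : s is the middle element
    apply pv_eq_of_pairwise_lt _ hpT
    · intro x
      rw [hmemT]
      simp only [List.mem_append, List.mem_reverse, List.mem_map, List.mem_singleton, hmemF]
      constructor
      · rintro ((⟨hx2, hxs, hxdvd⟩ | rfl) | ⟨i, ⟨hi2, his, hidvd⟩, rfl⟩)
        · have := h3 x hx2 hxs
          exact ⟨hx2, by nlinarith, hxdvd⟩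
        · exact ⟨by omega, by nlinarith, ⟨x, hc.symm⟩⟩
        · obtain ⟨hf2, _, hflt, hfdvd, _, _⟩ := hkey i hi2 his hidvd
          exact ⟨hf2, hflt, hfdvd⟩
      · rintro ⟨hx2, hxn, hxdvd⟩
        rcases lt_trichotomy x s with hxs | rfl | hsx
        · exact Or.inl (Or.inl ⟨hx2, hxs, hxdvd⟩)
        · exact Or.inl (Or.inr rfl)
        · have hne : x * x ≠ num := by nlinarith
          obtain ⟨i, hi, hfi⟩ := hback x hx2 hxn hxdvd (by omega) hne
          exact Or.inr ⟨i, hi, hfi⟩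
    · rw [List.pairwise_append]
      refine ⟨?_, hpL, ?_⟩
      · rw [List.pairwise_append]
        refine ⟨hpF, List.pairwise_singleton _ _, ?_⟩
        intro a ha b hb
        rw [List.mem_singleton] at hb
        subst hb
        exact ((hmemF a).1 ha).2.1
      · intro a ha b hb
        rw [List.mem_append, List.mem_singleton] at ha
        rw [List.mem_reverse, List.mem_map] at hb
        obtain ⟨i, hi, rfl⟩ := hb
        obtain ⟨hi2, his, hidvd⟩ := (hmemF i).1 hi
        obtain ⟨hf2, hsbig, _, _, hfsq, _⟩ := hkey i hi2 his hidvd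
        rcases ha with ha | rfl
        · have := ((hmemF a).1 ha).2.1; omega
        · nlinarith
  · -- s*s ≠ num : no middle element
    apply pv_eq_of_pairwise_lt _ hpT
    · intro x
      rw [hmemT]
      simp only [List.mem_append, List.mem_reverse, List.mem_map, hmemF]
      constructor
      · rintro (⟨hx2, hxs, hxdvd⟩ | ⟨i, ⟨hi2, his, hidvd⟩, rfl⟩)
        · have := h3 x hx2 hxs
          exact ⟨hx2, by nlinarith, hxdvd⟩
        · obtain ⟨hf2, _, hflt, hfdvd, _, _⟩ := hkey i hi2 his hidvd
          exact ⟨hf2, hflt, hfdvd⟩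
      · rintro ⟨hx2, hxn, hxdvd⟩
        rcases lt_or_ge x s with hxs | hsx
        · exact Or.inl ⟨hx2, hxs, hxdvd⟩
        · have hne : x * x ≠ num := by
            intro heq
            have : x = s := by nlinarith
            exact hc (by rw [← this]; omega)
          obtain ⟨i, hi, hfi⟩ := hback x hx2 hxn hxdvd hsx hne
          exact Or.inr ⟨i, hi, hfi⟩
    · rw [List.pairwise_append]
      exact ⟨hpF, hpL, hcrossL⟩


lemma portB_eq_scan (num : Int) : get_prime_factorial_alt num = pvScan num (pvTgt num) := by
  show pvScan num ((if (pvTrial num 2 [] []).1 * (pvTrial num 2 [] []).1 = num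
       then (pvTrial num 2 [] []).2.1 ++ [(pvTrial num 2 [] []).1]
       else (pvTrial num 2 [] []).2.1) ++ (pvTrial num 2 [] []).2.2.reverse) = _
  rw [divisors_eq]

-- ===== VERDICT (by name: the statement is the Claim_ definition above) =====
theorem get_prime_factorial_spec : Claim_equal_get_prime_factorial := by
  intro num _
  unfold Spec_get_prime_factorial
  rw [portA_eq_scan, portB_eq_scan]
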